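-- pv_equiv track=rewrite | github.com/macbre/sql-metadata | sql_metadata/table_extractor.py | _is_in_comma_list_after_keyword
-- ===== SOURCE A (Python) =====
-- def _is_in_comma_list_after_keyword(before: str) -> bool:
--     """Check whether a comma-preceded name belongs to a table list.
--
--     Looks backward for the nearest table-introducing keyword (e.g. ``FROM``)
--     and verifies that no interrupting keyword (e.g. ``WHERE``, ``SELECT``)
--     appears between it and the comma.  This handles multi-table ``FROM``
--     clauses.
--
--     .. code-block:: sql
--
--        SELECT * FROM t1, t2, t3  -- t2 and t3 are in comma list after FROM
--
--     :param before: Upper-cased SQL text preceding the comma + candidate name.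
--     :returns: ``True`` if the name is part of a comma-separated table list.
--     """
--     best_kw_pos = -1
--     for kw in _TABLE_CONTEXT_KEYWORDS:
--         kw_pos = before.rfind(kw)
--         if kw_pos > best_kw_pos:
--             best_kw_pos = kw_pos
--     if best_kw_pos < 0:
--         # no table keyword found at all
--         return False
--     between = before[best_kw_pos:]
--     # e.g. FROM t1 WHERE ... , x — WHERE interrupts, so x is not a table
--     return not any(ik in between for ik in _INTERRUPTING_KEYWORDS)
--
-- _TABLE_CONTEXT_KEYWORDS = {"FROM", "JOIN", "TABLE", "INTO", "UPDATE"}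
--
-- _INTERRUPTING_KEYWORDS = {"SELECT", "WHERE", "ORDER", "GROUP", "HAVING", "SET"}
-- ===== SOURCE B (Python) =====
-- _TABLE_CONTEXT_KEYWORDS = {"FROM", "JOIN", "TABLE", "INTO", "UPDATE"}
--
-- _INTERRUPTING_KEYWORDS = {"SELECT", "WHERE", "ORDER", "GROUP", "HAVING", "SET"}
--
--
-- def _is_in_comma_list_after_keyword(before: str) -> bool:
--     """Single forward left-to-right scan with a boolean state machine:
--     at each position a table keyword switches the state on, an interrupting
--     keyword switches it off; the final state is the answer (no table or
--     interrupting keyword is a prefix of another, so the two cannot start at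
--     the same position)."""
--     in_table_list = False
--     for i in range(len(before)):
--         if any(before.startswith(kw, i) for kw in _TABLE_CONTEXT_KEYWORDS):
--             in_table_list = True
--         elif any(before.startswith(ik, i) for ik in _INTERRUPTING_KEYWORDS):
--             in_table_list = False
--     return in_table_list
-- ===== Notes on version B (the rewrite author's own statement) =====
-- stated objective: alternative
-- what changed: Replaces the backward rfind/slice/substring-search pipeline with a single forward left-to-right scan holding a boolean state that each table keyword occurrence switches on and each interrupting keyword occurrence switches off.
import Mathlib
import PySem

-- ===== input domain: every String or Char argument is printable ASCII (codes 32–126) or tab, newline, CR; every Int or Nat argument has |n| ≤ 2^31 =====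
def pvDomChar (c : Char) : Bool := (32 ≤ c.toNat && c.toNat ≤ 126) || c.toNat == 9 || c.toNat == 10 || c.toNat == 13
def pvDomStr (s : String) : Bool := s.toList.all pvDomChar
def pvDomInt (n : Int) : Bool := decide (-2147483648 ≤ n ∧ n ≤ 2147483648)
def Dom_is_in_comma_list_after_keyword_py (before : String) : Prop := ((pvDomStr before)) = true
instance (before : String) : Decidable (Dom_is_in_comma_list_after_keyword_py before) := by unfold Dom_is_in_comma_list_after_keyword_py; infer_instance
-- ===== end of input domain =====

-- B replaces A's backward rfind/slice/substring-search with a single forward scan and a boolean state (alternative decomposition, same cost).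

-- ===== PORT A =====
-- the module constants (Python sets of string literals; only max/any over them is taken, so order is irrelevant)
def pvTableKws : List String := ["FROM", "JOIN", "TABLE", "INTO", "UPDATE"]
def pvInterKws : List String := ["SELECT", "WHERE", "ORDER", "GROUP", "HAVING", "SET"]

def is_in_comma_list_after_keyword_py (before : String) : Bool :=
  let best := pvTableKws.foldl (fun best kw =>
    let p := PySem.Str.rfind before kw
    if p > best then p else best) (-1)
  if best < 0 then false
  else
    let between := PySem.Str.slice before (some best) none
    ! pvInterKws.any (fun ik => PySem.Str.isIn ik between)

-- ===== PORT B =====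
-- Python's before.startswith(kw, i) with 0 ≤ i ≤ len(before): exact on that range
def pvStartsWithAt (s : List Char) (kw : String) (i : Nat) : Bool :=
  kw.toList.isPrefixOf (s.drop i)

def is_in_comma_list_after_keyword_py_alt (before : String) : Bool :=
  (List.range before.toList.length).foldl (fun st i =>
    if pvTableKws.any (fun kw => pvStartsWithAt before.toList kw i) then true
    else if pvInterKws.any (fun ik => pvStartsWithAt before.toList ik i) then false
    else st) false

-- ===== PRECONDITION & SPEC =====
def Spec_is_in_comma_list_after_keyword_py (before : String) (out : Bool) : Prop := out = is_in_comma_list_after_keyword_py_alt before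
instance (before : String) (out : Bool) : Decidable (Spec_is_in_comma_list_after_keyword_py before out) := by unfold Spec_is_in_comma_list_after_keyword_py; infer_instance

-- ===== CLAIM (what is proved, stated in full; the proofs are below) =====
def Claim_equal_is_in_comma_list_after_keyword_py : Prop := ∀ (before : String), Dom_is_in_comma_list_after_keyword_py before → Spec_is_in_comma_list_after_keyword_py before (is_in_comma_list_after_keyword_py before)

-- ===== LEMMAS AND PROOFS =====

-- abbreviations for "some table / interrupting keyword starts at i"
def pvT (s : List Char) (i : Nat) : Bool := pvTableKws.any (fun kw => pvStartsWithAt s kw i)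
def pvI (s : List Char) (i : Nat) : Bool := pvInterKws.any (fun ik => pvStartsWithAt s ik i)

-- rfind.go s sub j is the largest index i ≤ j where sub is a prefix of s.drop i (or -1): ≥ p iff such an i ≥ p exists
theorem pv_rfind_go_ge_iff (s sub : List Char) (j p : Nat) :
    ((p : Int) ≤ PySem.Chars.rfind.go s sub j) ↔
      ∃ i, p ≤ i ∧ i ≤ j ∧ sub.isPrefixOf (s.drop i) = true := by
  induction j with
  | zero =>
    simp only [PySem.Chars.rfind.go]
    split_ifs with h
    · constructor
      · intro hp; exact ⟨0, by omega, le_refl 0, by simpa using h⟩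
      · intro ⟨i, hpi, hi0, _⟩; omega
    · constructor
      · intro hp; omega
      · intro ⟨i, hpi, hi0, hpre⟩
        interval_cases i
        exact absurd (by simpa using hpre) h
  | succ j ih =>
    simp only [PySem.Chars.rfind.go]
    split_ifs with h
    · constructor
      · intro hp
        exact ⟨j + 1, by exact_mod_cast hp, le_refl _, h⟩
      · intro ⟨i, hpi, hij, _⟩
        have : (p : Int) ≤ (i : Int) := by exact_mod_cast hpi
        have : (i : Int) ≤ (j : Int) + 1 := by exact_mod_cast hij
        push_cast; omega
    · rw [ih]
      constructor
      · intro ⟨i, hpi, hij, hpre⟩; exact ⟨i, hpi, by omega, hpre⟩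
      · intro ⟨i, hpi, hij, hpre⟩
        refine ⟨i, hpi, ?_, hpre⟩
        rcases Nat.lt_succ_iff_lt_or_eq.mp (Nat.lt_succ_of_le hij) with h' | h'
        · omega
        · subst h'; exact absurd hpre (by simpa using h)

-- a nonnegative rfind.go result is an index at which sub is a prefix
theorem pv_rfind_go_prefix (s sub : List Char) (j : Nat) (h : 0 ≤ PySem.Chars.rfind.go s sub j) :
    sub.isPrefixOf (s.drop (PySem.Chars.rfind.go s sub j).toNat) = true := by
  induction j with
  | zero =>
    simp only [PySem.Chars.rfind.go] at *
    split_ifs at * with hp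
    · simpa using hp
    · omega
  | succ j ih =>
    simp only [PySem.Chars.rfind.go] at *
    split_ifs at * with hp
    · simpa using hp
    · exact ih h

theorem pv_rfind_prefix (s sub : List Char) (h : 0 ≤ PySem.Chars.rfind s sub) :
    sub.isPrefixOf (s.drop (PySem.Chars.rfind s sub).toNat) = true :=
  pv_rfind_go_prefix s sub s.length h

-- 'sub in s[t:]' (0 ≤ t ≤ len s) holds iff the rightmost occurrence of sub starts at index ≥ t
theorem pv_isIn_drop_iff_rfind_ge (s sub : List Char) (t : Nat) (ht : t ≤ s.length) :
    PySem.Chars.isIn sub (s.drop t) = true ↔ (t : Int) ≤ PySem.Chars.rfind s sub := by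
  rw [← PySem.Chars.exists_prefix_drop_iff_isIn]
  unfold PySem.Chars.rfind
  rw [pv_rfind_go_ge_iff]
  constructor
  · intro ⟨j, hj⟩
    rw [List.drop_drop] at hj
    by_cases hle : t + j ≤ s.length
    · exact ⟨t + j, by omega, hle, by simpa [List.isPrefixOf_iff_prefix] using hj⟩
    · have : s.drop (t + j) = [] := List.drop_eq_nil_of_le (by omega)
      rw [this] at hj
      have hsub : sub = [] := List.prefix_nil.mp hj
      exact ⟨s.length, ht, le_refl _, by simp [hsub]⟩
  · intro ⟨i, hti, hil, hpre⟩
    refine ⟨i - t, ?_⟩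
    rw [List.drop_drop, Nat.add_sub_cancel' hti]
    simpa [List.isPrefixOf_iff_prefix] using hpre

-- A's running-max loop over the keywords equals foldl max over the mapped rfind values
theorem pv_foldl_best_eq_max (l : List String) (f : String → Int) (a : Int) :
    l.foldl (fun best kw => let p := f kw; if p > best then p else best) a
      = (l.map f).foldl max a := by
  induction l generalizing a with
  | nil => rfl
  | cons x xs ih =>
    simp only [List.foldl_cons, List.map_cons]
    rw [ih]
    congr 1
    simp only [gt_iff_lt, max_def]
    split_ifs <;> omega

theorem pv_le_foldl_max_iff (l : List Int) (a x : Int) :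
    x ≤ l.foldl max a ↔ x ≤ a ∨ ∃ y ∈ l, x ≤ y := by
  induction l generalizing a with
  | nil => simp
  | cons b bs ih =>
    simp only [List.foldl_cons, ih, List.mem_cons]
    constructor
    · rintro (h | ⟨y, hy, hxy⟩)
      · rcases le_max_iff.mp h with h' | h'
        · exact Or.inl h'
        · exact Or.inr ⟨b, Or.inl rfl, h'⟩
      · exact Or.inr ⟨y, Or.inr hy, hxy⟩
    · rintro (h | ⟨y, (rfl | hy), hxy⟩)
      · exact Or.inl (le_max_of_le_left h)
      · exact Or.inl (le_max_of_le_right hxy)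
      · exact Or.inr ⟨y, hy, hxy⟩

-- foldl max returns either the seed or a list element
theorem pv_foldl_max_mem (l : List Int) (a : Int) :
    l.foldl max a = a ∨ l.foldl max a ∈ l := by
  induction l generalizing a with
  | nil => exact Or.inl rfl
  | cons b bs ih =>
    simp only [List.foldl_cons]
    rcases ih (max a b) with h | h
    · rcases max_choice a b with he | he
      · exact Or.inl (h.trans he)
      · exact Or.inr (by rw [h, he]; exact List.mem_cons_self)
    · exact Or.inr (List.mem_cons_of_mem _ h)

-- no table keyword and interrupting keyword can start at the same position (none is a prefix of another)
theorem pv_no_tie (s : List Char) (i : Nat) (hT : pvT s i = true) : pvI s i = false := by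
  unfold pvT at hT
  rcases List.any_eq_true.mp hT with ⟨kw, hkw, hkp⟩
  unfold pvI
  rw [List.any_eq_false]
  intro ik hik
  rw [Bool.not_eq_true]
  by_contra hip
  rw [Bool.not_eq_false] at hip
  unfold pvStartsWithAt at hkp hip
  rw [List.isPrefixOf_iff_prefix] at hkp hip
  have := List.prefix_or_prefix_of_prefix hkp hip
  fin_cases hkw <;> fin_cases hik <;> revert this <;> decide

-- the forward state machine returns true iff some table keyword starts at some i < n
-- with no interrupting keyword starting strictly after it (before n)
theorem pv_fold_char (s : List Char) (n : Nat) :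
    ((List.range n).foldl (fun st i => if pvT s i then true else if pvI s i then false else st) false = true)
      ↔ ∃ i, i < n ∧ pvT s i = true ∧ ∀ j, i < j → j < n → pvI s j = false := by
  induction n with
  | zero => simp
  | succ n ih =>
    rw [List.range_succ, List.foldl_append]
    simp only [List.foldl_cons, List.foldl_nil]
    by_cases hT : pvT s n = true
    · simp only [hT, if_true]
      constructor
      · intro _; exact ⟨n, Nat.lt_succ_self n, hT, fun j hj hj' => by omega⟩
      · intro _; trivial
    · rw [if_neg (by simp [hT])]
      by_cases hI : pvI s n = true
      · simp only [hI, if_true]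
        constructor
        · intro h; exact absurd h (by simp)
        · rintro ⟨i, hin, hTi, hno⟩
          have hne : i ≠ n := fun he => hT (he ▸ hTi)
          exact absurd hI (by simp [hno n (by omega) (Nat.lt_succ_self n)])
      · rw [if_neg (by simp [hI]), ih]
        constructor
        · rintro ⟨i, hin, hTi, hno⟩
          refine ⟨i, by omega, hTi, fun j hj hj' => ?_⟩
          rcases Nat.lt_succ_iff_lt_or_eq.mp hj' with h' | h'
          · exact hno j hj h'
          · subst h'; simpa using hI
        · rintro ⟨i, hin, hTi, hno⟩
          have hne : i ≠ n := fun he => hT (he ▸ hTi)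
          exact ⟨i, by omega, hTi, fun j hj hj' => hno j hj (by omega)⟩

-- all keywords are nonempty, so none starts at or beyond the end of the string
theorem pv_T_ge_len (s : List Char) (i : Nat) (h : s.length ≤ i) : pvT s i = false := by
  unfold pvT pvStartsWithAt
  rw [List.drop_eq_nil_of_le h]
  decide

theorem pv_I_ge_len (s : List Char) (i : Nat) (h : s.length ≤ i) : pvI s i = false := by
  unfold pvI pvStartsWithAt
  rw [List.drop_eq_nil_of_le h]
  decide

-- ===== VERDICT (by name: the statement is the Claim_ definition above) =====
theorem is_in_comma_list_after_keyword_py_spec : Claim_equal_is_in_comma_list_after_keyword_py := by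
  intro before _
  unfold Spec_is_in_comma_list_after_keyword_py
  unfold is_in_comma_list_after_keyword_py is_in_comma_list_after_keyword_py_alt
  rw [pv_foldl_best_eq_max]
  set s := before.toList with hs
  set n := s.length with hn
  set best := (pvTableKws.map (fun kw => PySem.Str.rfind before kw)).foldl max (-1) with hbest
  -- an occurrence of a table keyword at i bounds best from below
  have fact1 : ∀ i : Nat, i < n → pvT s i = true → 0 ≤ best ∧ (i : Int) ≤ best := by
    intro i hin hT
    rcases List.any_eq_true.mp hT with ⟨kw, hkw, hkp⟩
    have hrf : (i : Int) ≤ PySem.Chars.rfind s kw.toList := by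
      unfold PySem.Chars.rfind
      exact (pv_rfind_go_ge_iff s kw.toList n i).mpr ⟨i, le_refl i, by omega, hkp⟩
    have hle : PySem.Chars.rfind s kw.toList ≤ best := by
      refine (pv_le_foldl_max_iff _ _ _).mpr (Or.inr ⟨_, List.mem_map.mpr ⟨kw, hkw, rfl⟩, ?_⟩)
      rw [PySem.Str.rfind_eq]
    exact ⟨by omega, le_trans hrf hle⟩
  -- a nonnegative best is the start of a table keyword occurrence, inside the string
  have fact2 : 0 ≤ best → best.toNat < n ∧ pvT s best.toNat = true := by
    intro h0
    rcases pv_foldl_max_mem (pvTableKws.map (fun kw => PySem.Str.rfind before kw)) (-1) with hm | hm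
    · rw [← hbest] at hm; omega
    · rw [← hbest] at hm
      rcases List.mem_map.mp hm with ⟨kw, hkw, hkeq⟩
      rw [PySem.Str.rfind_eq, ← hs] at hkeq
      have hpre : kw.toList.isPrefixOf (s.drop best.toNat) = true := by
        rw [← hkeq]; exact pv_rfind_prefix s kw.toList (hkeq ▸ h0)
      have hT : pvT s best.toNat = true :=
        List.any_eq_true.mpr ⟨kw, hkw, hpre⟩
      refine ⟨?_, hT⟩
      by_contra hge
      rw [pv_T_ge_len s best.toNat (by omega)] at hT
      exact Bool.false_ne_true hT
  rw [Bool.eq_iff_iff]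
  show (if best < 0 then false
        else !pvInterKws.any fun ik => PySem.Str.isIn ik (PySem.Str.slice before (some best) none)) = true
    ↔ ((List.range n).foldl (fun st i => if pvT s i then true else if pvI s i then false else st) false = true)
  rw [pv_fold_char]
  by_cases h0 : best < 0
  · rw [if_pos h0]
    simp only [Bool.false_eq_true, false_iff]
    rintro ⟨i, hin, hTi, -⟩
    have := fact1 i hin hTi
    omega
  · rw [not_lt] at h0
    rw [if_neg (not_lt.mpr h0)]
    -- an interrupting keyword occurs in before[best:] iff one starts at some j ∈ [best, n)
    have fact3 : (pvInterKws.any (fun ik => PySem.Str.isIn ik (PySem.Str.slice before (some best) none))) = true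
        ↔ ∃ j : Nat, best.toNat ≤ j ∧ j < n ∧ pvI s j = true := by
      have hblen : best ≤ (n : Int) := by
        have := (fact2 h0).1; omega
      have hslice : (PySem.Str.slice before (some best) none).toList = s.drop best.toNat := by
        simp [PySem.Str.slice, PySem.List.slice_from _ h0, ← hs]
      constructor
      · intro hany
        rcases List.any_eq_true.mp hany with ⟨ik, hik, hin⟩
        rw [PySem.Str.isIn_eq, hslice] at hin
        have hge := (pv_isIn_drop_iff_rfind_ge s ik.toList best.toNat (by omega)).mp hin
        unfold PySem.Chars.rfind at hge
        have hge' : ((best.toNat : Int)) ≤ PySem.Chars.rfind.go s ik.toList n := by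
          have : ((best.toNat : Int)) = best := Int.toNat_of_nonneg h0
          omega
        rcases (pv_rfind_go_ge_iff s ik.toList n best.toNat).mp hge' with ⟨j, hbj, hjn, hpre⟩
        have hI : pvI s j = true := List.any_eq_true.mpr ⟨ik, hik, hpre⟩
        have hjlt : j < n := by
          by_contra hge2
          rw [pv_I_ge_len s j (by omega)] at hI
          exact Bool.false_ne_true hI
        exact ⟨j, hbj, hjlt, hI⟩
      · rintro ⟨j, hbj, hjn, hI⟩
        rcases List.any_eq_true.mp hI with ⟨ik, hik, hpre⟩
        refine List.any_eq_true.mpr ⟨ik, hik, ?_⟩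
        rw [PySem.Str.isIn_eq, hslice]
        refine (pv_isIn_drop_iff_rfind_ge s ik.toList best.toNat (by omega)).mpr ?_
        unfold PySem.Chars.rfind
        have : ((best.toNat : Int)) ≤ PySem.Chars.rfind.go s ik.toList n :=
          (pv_rfind_go_ge_iff s ik.toList n best.toNat).mpr ⟨j, hbj, by omega, hpre⟩
        have h2 : ((best.toNat : Int)) = best := Int.toNat_of_nonneg h0
        omega
    constructor
    · intro hA
      rw [Bool.not_eq_true'] at hA
      refine ⟨best.toNat, (fact2 h0).1, (fact2 h0).2, ?_⟩
      intro j hbj hjn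
      by_contra hI
      rw [Bool.not_eq_false] at hI
      exact absurd (fact3.mpr ⟨j, by omega, hjn, hI⟩) (by rw [hA]; exact Bool.false_ne_true)
    · rintro ⟨i, hin, hTi, hno⟩
      rw [Bool.not_eq_true']
      by_contra hany
      rw [Bool.not_eq_false] at hany
      rcases fact3.mp hany with ⟨j, hbj, hjn, hI⟩
      have hib := (fact1 i hin hTi).2
      have hij : i ≤ j := by omega
      rcases Nat.lt_or_ge i j with hlt | hge
      · rw [hno j hlt hjn] at hI
        exact Bool.false_ne_true hI
      · have : i = j := by omega
        subst this
        rw [pv_no_tie s i hTi] at hI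
        exact Bool.false_ne_true hI
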